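-- pv_equiv track=rewrite | github.com/Eliminater74/atoto_firmware_downloader | atoto_fw/core/grouping.py | group_by_url
-- ===== SOURCE A (Python) =====
-- from typing import Any, Dict, List
--
-- def group_by_url(rows: List[Dict[str,Any]]) -> List[Dict[str,Any]]:
--     grouped: Dict[str, Dict[str, Any]] = {}
--     for r in rows:
--         u = (r.get("url") or "").strip()
--         if not u: continue
--         g = grouped.get(u)
--         if not g:
--             grouped[u] = r.copy()
--             continue
--         # merge variants
--         v1 = set(filter(None, (g.get("variants","-") or "-").split(",")))
--         v2 = set(filter(None, (r.get("variants","-") or "-").split(",")))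
--         v = (v1 | v2) - {"-"}
--         g["variants"] = ",".join(sorted(v)) if v else "-"
--         # prefer concrete res/scope
--         if g.get("res","?") == "?" and r.get("res","?") != "?":
--             g["res"] = r["res"]; g["fit"] = r.get("fit", g.get("fit","?"))
--         if r.get("scope") == "Res-specific":
--             g["scope"] = "Res-specific"
--     return list(grouped.values())
-- ===== SOURCE B (Python) =====
-- from typing import Any, Dict, List
--
-- def _merge(g: Dict[str, Any], r: Dict[str, Any]) -> Dict[str, Any]:
--     parts = (g.get("variants", "-") or "-").split(",") + (r.get("variants", "-") or "-").split(",")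
--     v = sorted({p for p in parts if p and p != "-"})
--     g["variants"] = ",".join(v) if v else "-"
--     if g.get("res", "?") == "?" and r.get("res", "?") != "?":
--         g["res"] = r["res"]
--         g["fit"] = r.get("fit", g.get("fit", "?"))
--     if r.get("scope") == "Res-specific":
--         g["scope"] = "Res-specific"
--     return g
--
-- def _reduce(bucket: List[Dict[str, Any]]) -> Dict[str, Any]:
--     acc = bucket[0].copy()
--     for r in bucket[1:]:
--         acc = _merge(acc, r)
--     return acc
--
-- def group_by_url(rows: List[Dict[str, Any]]) -> List[Dict[str, Any]]:
--     buckets: Dict[str, List[Dict[str, Any]]] = {}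
--     for r in rows:
--         u = (r.get("url") or "").strip()
--         if not u:
--             continue
--         if u in buckets:
--             buckets[u].append(r)
--         else:
--             buckets[u] = [r]
--     return [_reduce(b) for b in buckets.values()]
-- ===== Notes on version B (the rewrite author's own statement) =====
-- stated objective: alternative
-- what changed: B replaces A's single pass that merges each row into a dict of running accumulators by a two-phase group-then-reduce: phase 1 buckets rows by stripped url in first-appearance order, phase 2 left-folds each bucket through a merge step that unions the filtered variant parts in one set comprehension instead of A's two sets, union and difference.
import Mathlib
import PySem

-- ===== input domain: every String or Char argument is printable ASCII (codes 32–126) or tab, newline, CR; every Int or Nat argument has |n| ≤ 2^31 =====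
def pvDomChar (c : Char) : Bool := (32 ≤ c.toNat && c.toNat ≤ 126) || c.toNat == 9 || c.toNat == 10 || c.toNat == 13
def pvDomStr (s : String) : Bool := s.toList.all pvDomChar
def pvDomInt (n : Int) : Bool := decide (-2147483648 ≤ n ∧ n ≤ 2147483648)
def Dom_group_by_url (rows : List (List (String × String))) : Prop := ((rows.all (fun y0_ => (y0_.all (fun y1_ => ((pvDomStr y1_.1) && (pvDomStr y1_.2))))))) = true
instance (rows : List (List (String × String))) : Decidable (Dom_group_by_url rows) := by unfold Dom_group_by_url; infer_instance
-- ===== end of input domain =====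

-- B restructures A's single accumulate-into-a-dict pass as bucket-by-url then fold each bucket
-- (equal return value; neither program mutates its input).

-- ===== PORT A =====
-- A's '# merge variants … scope' block, transliterated statement by statement
-- (factored out of the loop body only for readability; x.split(",") is PySem.Str.split? with the
-- nonempty literal separator ",", so .getD [] is exact)
def pvMergeA (g : PySem.Dict String String) (rd : PySem.Dict String String) : PySem.Dict String String :=
  let s1 := g.getD "variants" "-"
  let s1 := if s1 = "" then "-" else s1          -- '… or "-"'
  let s2 := rd.getD "variants" "-"
  let s2 := if s2 = "" then "-" else s2
  let v1 : PySem.Set String := PySem.Set.ofList (((PySem.Str.split? s1 ",").getD []).filter (fun p => p ≠ ""))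
  let v2 : PySem.Set String := PySem.Set.ofList (((PySem.Str.split? s2 ",").getD []).filter (fun p => p ≠ ""))
  let v : PySem.Set String := PySem.Set.discard (PySem.Set.union v1 v2) "-"
  let g := g.insert "variants"
    (if v = [] then "-" else PySem.Str.join "," (PySem.List.sorted v (fun x => x) false))
  let g :=
    if g.getD "res" "?" = "?" ∧ rd.getD "res" "?" ≠ "?" then
      let g := g.insert "res" (rd.getD "res" "?")   -- under the guard, r["res"] is this value
      g.insert "fit" (rd.getD "fit" (g.getD "fit" "?"))
    else g
  if rd.get? "scope" = some "Res-specific" then g.insert "scope" "Res-specific" else g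

-- one step of A's loop
def pvStepA (grouped : PySem.Dict String (PySem.Dict String String))
    (r : List (String × String)) : PySem.Dict String (PySem.Dict String String) :=
  let rd := PySem.Dict.ofList r
  let u := PySem.Str.strip (rd.getD "url" "")
  if u = "" then grouped
  else
    match grouped.get? u with
    | none => grouped.insert u rd
    | some g =>
      if g.items = [] then grouped.insert u rd   -- 'if not g' is also true for an empty dict
      else grouped.insert u (pvMergeA g rd)

def group_by_url (rows : List (List (String × String))) : List (List (String × String)) :=
  ((rows.foldl pvStepA PySem.Dict.empty).values).map PySem.Dict.items

-- ===== PORT B =====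
-- _merge of Source B
def pvMerge (g : PySem.Dict String String) (rd : PySem.Dict String String) : PySem.Dict String String :=
  let parts : List String :=
      (PySem.Str.split? (let t := g.getD "variants" "-"; if t = "" then "-" else t) ",").getD []
    ++ (PySem.Str.split? (let t := rd.getD "variants" "-"; if t = "" then "-" else t) ",").getD []
  let v := PySem.List.sorted (PySem.Set.ofList (parts.filter (fun p => p ≠ "" ∧ p ≠ "-"))) (fun x => x) false
  let g := g.insert "variants" (if v = [] then "-" else PySem.Str.join "," v)
  let g :=
    if g.getD "res" "?" = "?" ∧ rd.getD "res" "?" ≠ "?" then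
      let g := g.insert "res" (rd.getD "res" "?")
      g.insert "fit" (rd.getD "fit" (g.getD "fit" "?"))
    else g
  if rd.get? "scope" = some "Res-specific" then g.insert "scope" "Res-specific" else g

-- _reduce of Source B
def pvReduce (bucket : List (PySem.Dict String String)) : PySem.Dict String String :=
  match bucket with
  | [] => PySem.Dict.empty          -- never reached: buckets are nonempty
  | h :: t => t.foldl pvMerge h

-- phase 1 of Source B: one bucketing step
def pvStepB (b : PySem.Dict String (List (PySem.Dict String String)))
    (r : List (String × String)) : PySem.Dict String (List (PySem.Dict String String)) :=
  let rd := PySem.Dict.ofList r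
  let u := PySem.Str.strip (rd.getD "url" "")
  if u = "" then b
  else
    match b.get? u with
    | some bs => b.insert u (bs ++ [rd])
    | none => b.insert u [rd]

def group_by_url_alt (rows : List (List (String × String))) : List (List (String × String)) :=
  (((rows.foldl pvStepB PySem.Dict.empty).values).map pvReduce).map PySem.Dict.items

-- ===== PRECONDITION & SPEC =====
def Spec_group_by_url (rows : List (List (String × String))) (out : List (List (String × String))) : Prop := out = group_by_url_alt rows
instance (rows : List (List (String × String))) (out : List (List (String × String))) : Decidable (Spec_group_by_url rows out) := by unfold Spec_group_by_url; infer_instance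

-- ===== CLAIM (what is proved, stated in full; the proofs are below) =====
def Claim_equal_group_by_url : Prop := ∀ (rows : List (List (String × String))), Dom_group_by_url rows → Spec_group_by_url rows (group_by_url rows)

-- ===== LEMMAS AND PROOFS =====

-- map pvReduce over the values of a buckets dict
def pvMapV (b : PySem.Dict String (List (PySem.Dict String String))) : PySem.Dict String (PySem.Dict String String) :=
  PySem.Dict.mk (b.items.map (fun p => (p.1, pvReduce p.2)))

theorem pvMapV_get? (b : PySem.Dict String (List (PySem.Dict String String))) (k : String) :
    (pvMapV b).get? k = (b.get? k).map pvReduce := by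
  obtain ⟨l⟩ := b
  induction l with
  | nil => rfl
  | cons p rest ih =>
    obtain ⟨k', bs⟩ := p
    show (PySem.Dict.mk ((k', pvReduce bs) :: _)).get? k = _
    rw [PySem.Dict.get?_mk_cons, PySem.Dict.get?_mk_cons]
    by_cases h : k' == k
    · simp [h]
    · simp only [h, Bool.false_eq_true, if_false]
      exact ih

theorem pvMapV_contains (b : PySem.Dict String (List (PySem.Dict String String))) (k : String) :
    (pvMapV b).contains k = b.contains k := by
  rw [PySem.Dict.contains_eq_isSome_get?, PySem.Dict.contains_eq_isSome_get?, pvMapV_get?]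
  cases b.get? k <;> rfl

theorem pv_ins_ne_nil {κ ν : Type} [BEq κ] (d : PySem.Dict κ ν) (k : κ) (v : ν) : (d.insert k v).items ≠ [] := by
  by_cases hc : d.contains k
  · rw [PySem.Dict.items_insert_of_contains d v hc]
    intro h
    rw [show d = PySem.Dict.mk d.items from rfl, List.map_eq_nil_iff.mp h] at hc
    simp [PySem.Dict.contains] at hc
  · rw [PySem.Dict.items_insert_of_not_contains d v (by simpa using hc)]; simp

theorem pvMerge_ne_nil (g rd : PySem.Dict String String) : (pvMerge g rd).items ≠ [] := by
  unfold pvMerge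
  dsimp only
  split_ifs <;> apply pv_ins_ne_nil

-- the variants string A computes equals the one B computes
theorem pv_variants_eq (l1 l2 : List String) :
    (if PySem.Set.discard (PySem.Set.union (PySem.Set.ofList (l1.filter (fun p => p ≠ "")))
          (PySem.Set.ofList (l2.filter (fun p => p ≠ "")))) "-" = ([] : List String) then "-"
     else PySem.Str.join "," (PySem.List.sorted (PySem.Set.discard (PySem.Set.union
          (PySem.Set.ofList (l1.filter (fun p => p ≠ "")))
          (PySem.Set.ofList (l2.filter (fun p => p ≠ "")))) "-") (fun x => x) false))
    = (if PySem.List.sorted (PySem.Set.ofList ((l1 ++ l2).filter (fun p => p ≠ "" ∧ p ≠ "-"))) (fun x => x) false = ([] : List String) then "-"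
       else PySem.Str.join "," (PySem.List.sorted (PySem.Set.ofList ((l1 ++ l2).filter (fun p => p ≠ "" ∧ p ≠ "-"))) (fun x => x) false)) := by
  set vA := PySem.Set.discard (PySem.Set.union (PySem.Set.ofList (l1.filter (fun p => p ≠ "")))
    (PySem.Set.ofList (l2.filter (fun p => p ≠ "")))) "-" with hvA
  set vB := PySem.Set.ofList ((l1 ++ l2).filter (fun p => p ≠ "" ∧ p ≠ "-")) with hvB
  have hperm : vA.Perm vB := by
    apply (List.perm_ext_iff_of_nodup ?_ ?_).mpr
    · intro x
      rw [hvA, hvB]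
      rw [PySem.Set.mem_discard, PySem.Set.mem_union, PySem.Set.mem_ofList, PySem.Set.mem_ofList,
        PySem.Set.mem_ofList]
      simp only [List.mem_filter, List.mem_append, decide_eq_true_eq]
      tauto
    · exact PySem.Set.nodup_discard _ _ (PySem.Set.nodup_union _ _ (PySem.Set.nodup_ofList _))
    · exact PySem.Set.nodup_ofList _
  have hsorted : PySem.List.sorted vA (fun x => x) false = PySem.List.sorted vB (fun x => x) false :=
    PySem.List.sorted_eq_sorted_of_perm vA vB (fun x => x) (fun _ _ h => h) hperm
  have hnil : (vA = []) ↔ (vB = []) := by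
    rw [← List.length_eq_zero_iff, ← List.length_eq_zero_iff, hperm.length_eq]
  by_cases hA : vA = ([] : List String)
  · rw [if_pos hA, if_pos (by rw [PySem.List.sorted_eq_nil_iff]; exact hnil.mp hA)]
  · rw [if_neg hA, if_neg ?_, hsorted]
    rw [PySem.List.sorted_eq_nil_iff]
    intro hB
    exact hA (hnil.mpr hB)

-- A's merge block computes B's _merge
theorem pvMergeA_eq (g rd : PySem.Dict String String) : pvMergeA g rd = pvMerge g rd := by
  unfold pvMergeA pvMerge
  dsimp only
  rw [pv_variants_eq]

-- pvReduce over a bucket extended on the right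
theorem pvReduce_append (bs : List (PySem.Dict String String)) (rd : PySem.Dict String String) (h : bs ≠ []) :
    pvReduce (bs ++ [rd]) = pvMerge (pvReduce bs) rd := by
  obtain ⟨hd, t, rfl⟩ := List.exists_cons_of_ne_nil h
  show (t ++ [rd]).foldl pvMerge hd = _
  rw [List.foldl_append]
  rfl

-- invariant: every bucket reduces to a nonempty dict
def pvInv (b : PySem.Dict String (List (PySem.Dict String String))) : Prop :=
  ∀ p ∈ b.items, (pvReduce p.2).items ≠ []

theorem pv_rd_ne_nil (r : List (String × String))
    (hu : PySem.Str.strip ((PySem.Dict.ofList r).getD "url" "") ≠ "") :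
    (PySem.Dict.ofList r).items ≠ [] := by
  intro h
  apply hu
  rw [show PySem.Dict.ofList r = PySem.Dict.mk (PySem.Dict.ofList r).items from rfl, h]
  rfl

theorem pvStep_comm (b : PySem.Dict String (List (PySem.Dict String String)))
    (r : List (String × String)) (hinv : pvInv b) :
    pvStepA (pvMapV b) r = pvMapV (pvStepB b r) ∧ pvInv (pvStepB b r) := by
  unfold pvStepA pvStepB
  dsimp only
  by_cases hu : PySem.Str.strip ((PySem.Dict.ofList r).getD "url" "") = ""
  · rw [if_pos hu, if_pos hu]
    exact ⟨rfl, hinv⟩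
  · rw [if_neg hu, if_neg hu, pvMapV_get?]
    cases hg : b.get? (PySem.Str.strip ((PySem.Dict.ofList r).getD "url" "")) with
    | none =>
      have hc : b.contains (PySem.Str.strip ((PySem.Dict.ofList r).getD "url" "")) = false := by
        rw [PySem.Dict.contains_eq_isSome_get?, hg]; rfl
      dsimp only
      constructor
      · apply PySem.Dict.ext
        show ((pvMapV b).insert _ (PySem.Dict.ofList r)).items
            = (pvMapV (b.insert _ [PySem.Dict.ofList r])).items
        rw [PySem.Dict.items_insert_of_not_contains _ _ (by rw [pvMapV_contains]; exact hc)]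
        show _ = ((b.insert _ [PySem.Dict.ofList r]).items.map _)
        rw [PySem.Dict.items_insert_of_not_contains _ _ hc]
        simp [pvMapV, pvReduce]
      · intro p hp
        rw [PySem.Dict.mem_items_insert] at hp
        rcases hp with rfl | ⟨hp, _⟩
        · exact pv_rd_ne_nil r hu
        · exact hinv p hp
    | some bs =>
      have hmem := PySem.Dict.mem_items_of_get?_eq_some b hg
      have hne : (pvReduce bs).items ≠ [] := hinv _ hmem
      have hbs : bs ≠ [] := by rintro rfl; exact hne rfl
      have hc : b.contains (PySem.Str.strip ((PySem.Dict.ofList r).getD "url" "")) = true := by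
        rw [PySem.Dict.contains_eq_isSome_get?, hg]; rfl
      dsimp only [Option.map_some]
      rw [if_neg hne]
      constructor
      · rw [pvMergeA_eq]
        apply PySem.Dict.ext
        show ((pvMapV b).insert _ (pvMerge (pvReduce bs) (PySem.Dict.ofList r))).items
            = (pvMapV (b.insert _ (bs ++ [PySem.Dict.ofList r]))).items
        rw [PySem.Dict.items_insert_of_contains _ _ (by rw [pvMapV_contains]; exact hc)]
        show _ = ((b.insert _ (bs ++ [PySem.Dict.ofList r])).items.map _)
        rw [PySem.Dict.items_insert_of_contains _ _ hc]
        simp only [pvMapV, List.map_map]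
        apply List.map_congr_left
        intro p _
        by_cases hp : p.1 == PySem.Str.strip ((PySem.Dict.ofList r).getD "url" "")
        · simp only [Function.comp_apply, hp, if_pos]
          rw [pvReduce_append bs _ hbs]
        · simp only [Function.comp_apply, hp, Bool.false_eq_true, if_false]
      · intro p hp
        rw [PySem.Dict.mem_items_insert] at hp
        rcases hp with rfl | ⟨hp, _⟩
        · rw [pvReduce_append bs _ hbs]
          exact pvMerge_ne_nil _ _
        · exact hinv p hp

theorem pv_main (rows : List (List (String × String)))
    (b : PySem.Dict String (List (PySem.Dict String String))) (hinv : pvInv b) :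
    rows.foldl pvStepA (pvMapV b) = pvMapV (rows.foldl pvStepB b) := by
  induction rows generalizing b with
  | nil => rfl
  | cons r rest ih =>
    obtain ⟨hstep, hinv'⟩ := pvStep_comm b r hinv
    simp only [List.foldl_cons, hstep]
    exact ih _ hinv'

-- ===== VERDICT (by name: the statement is the Claim_ definition above) =====
theorem group_by_url_spec : Claim_equal_group_by_url := by
  intro rows _
  unfold Spec_group_by_url group_by_url group_by_url_alt
  have h0 : (PySem.Dict.empty : PySem.Dict String (PySem.Dict String String)) = pvMapV PySem.Dict.empty := rfl
  rw [h0, pv_main rows PySem.Dict.empty (by intro p hp; cases hp)]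
  simp [pvMapV, PySem.Dict.values, List.map_map]
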